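-- pv_equiv track=rewrite | github.com/coultat/Python_Challenges | my_project/exercises/basics/maths/numeros_primos.py | gemelo_primo_sexy
-- ===== SOURCE A (Python) =====
-- def calc_primes_up_to(max_value):
--     primes_set = set()
--     for i in range(1, max_value):
--         prime = True
--         for j in range(1, i):
--             if i % j == 0 and j != 1:
--                 prime = False
--                 break
--         if prime == False:
--             continue
--         else:
--             primes_set.add(i)
--     return primes_set
--
-- def gemelo_primo_sexy(max_value):
--     prime_numbers = list(calc_primes_up_to(max_value))
--     factores = {'gemelos': 2, 'primos': 4, 'sexy': 6}
--     resultados = {'gemelos': set(), 'primos': set(), 'sexy': set()}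
--
--     for k, v in factores.items():
--         for i in prime_numbers:
--             if i + v in prime_numbers:
--                 resultados[k].add((i, i + v))
--
--     return resultados
-- ===== SOURCE B (Python) =====
-- def gemelo_primo_sexy(max_value):
--     # B: trial division only up to sqrt(i) (keeping A's convention that 1 and 2 pass),
--     # and O(1) set lookups for the pair phase instead of list membership scans.
--     primes = []
--     for i in range(1, max_value):
--         j = 2
--         is_p = True
--         while j * j <= i:
--             if i % j == 0:
--                 is_p = False
--                 break
--             j += 1
--         if is_p:
--             primes.append(i)
--     prime_set = set(primes)
--     return {name: {(p, p + gap) for p in primes if p + gap in prime_set}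
--             for name, gap in (('gemelos', 2), ('primos', 4), ('sexy', 6))}
-- ===== Notes on version B (the rewrite author's own statement) =====
-- stated objective: faster
-- what changed: B tests each candidate by trial division only up to sqrt(i) instead of scanning all j < i, collects the primes in one list, and does the pair phase with O(1) set membership instead of A's O(pi(n)) list scans inside nested loops.
import Mathlib
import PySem

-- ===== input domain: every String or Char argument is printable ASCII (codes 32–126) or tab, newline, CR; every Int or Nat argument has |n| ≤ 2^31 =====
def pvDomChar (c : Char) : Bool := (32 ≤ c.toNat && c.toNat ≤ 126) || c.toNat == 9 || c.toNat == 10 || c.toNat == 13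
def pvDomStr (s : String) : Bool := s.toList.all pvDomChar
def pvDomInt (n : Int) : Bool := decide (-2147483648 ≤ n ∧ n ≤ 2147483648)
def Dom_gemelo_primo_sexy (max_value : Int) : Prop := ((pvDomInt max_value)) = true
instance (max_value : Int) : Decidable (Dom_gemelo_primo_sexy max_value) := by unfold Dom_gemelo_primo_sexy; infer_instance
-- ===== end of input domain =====

-- B replaces A's full trial division (all j < i) by trial division up to sqrt(i), and the pair
-- phase's list-membership scans by set membership; objective: faster (same return value,
-- including A's convention that 1 and 2 pass the divisor test).

-- ===== PORT A =====
def calc_primes_up_to (max_value : Int) : PySem.Set Int :=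
  (PySem.List.pyRange 1 max_value).foldl
    (fun primes_set i =>
      -- inner 'for j in range(1, i)' with break: prime stays True unless some j divides i, j != 1
      let prime : Bool :=
        !((PySem.List.pyRange 1 i).any (fun j => PySem.Int.mod i j == 0 && j != 1))
      if prime = false then primes_set else PySem.Set.add primes_set i)
    PySem.Set.empty

def gemelo_primo_sexy (max_value : Int) : List (String × List (Int × Int)) :=
  let prime_numbers : List Int := calc_primes_up_to max_value
  let factores : PySem.Dict String Int :=
    (((PySem.Dict.empty).insert "gemelos" 2).insert "primos" 4).insert "sexy" 6
  let resultados : PySem.Dict String (PySem.Set (Int × Int)) :=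
    (((PySem.Dict.empty).insert "gemelos" PySem.Set.empty).insert "primos"
        PySem.Set.empty).insert "sexy" PySem.Set.empty
  let resultados :=
    factores.items.foldl
      (fun res kv =>
        prime_numbers.foldl
          (fun res i =>
            if prime_numbers.contains (i + kv.2) then
              res.modify kv.1 PySem.Set.empty (fun s => PySem.Set.add s (i, i + kv.2))
            else res)
          res)
      resultados
  resultados.items

-- ===== PORT B =====
-- 'j = 2; while j * j <= i: if i % j == 0: not prime; j += 1'
def pvTrialLoop (i j : Int) : Bool :=
  if _h : j * j ≤ i then
    if PySem.Int.mod i j == 0 then false else pvTrialLoop i (j + 1)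
  else true
termination_by (i + 2 - j).toNat
decreasing_by
  have h1 : 0 ≤ (j - 1) * j := by
    rcases (by omega : j ≤ 0 ∨ 0 < j) with h' | h'
    · have h'' := mul_nonneg (by omega : (0:Int) ≤ 1 - j) (by omega : (0:Int) ≤ -j)
      nlinarith [h'']
    · exact mul_nonneg (by omega) (by omega)
  have h2 : (j - 1) * j = j * j - j := by ring
  omega

def gemelo_primo_sexy_alt (max_value : Int) : List (String × List (Int × Int)) :=
  let primes : List Int :=
    (PySem.List.pyRange 1 max_value).foldl
      (fun acc i => if pvTrialLoop i 2 then acc ++ [i] else acc) []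
  let prime_set : PySem.Set Int := PySem.Set.ofList primes
  [("gemelos", (2 : Int)), ("primos", 4), ("sexy", 6)].map
    (fun ng =>
      (ng.1,
        PySem.Set.ofList
          ((primes.filter (fun p => prime_set.contains (p + ng.2))).map
            (fun p => (p, p + ng.2)))))

-- ===== PRECONDITION & SPEC =====
def Spec_gemelo_primo_sexy (max_value : Int) (out : List (String × List (Int × Int))) : Prop := out = gemelo_primo_sexy_alt max_value
instance (max_value : Int) (out : List (String × List (Int × Int))) : Decidable (Spec_gemelo_primo_sexy max_value out) := by unfold Spec_gemelo_primo_sexy; infer_instance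

-- ===== CLAIM (what is proved, stated in full; the proofs are below) =====
def Claim_equal_gemelo_primo_sexy : Prop := ∀ (max_value : Int), Dom_gemelo_primo_sexy max_value → Spec_gemelo_primo_sexy max_value (gemelo_primo_sexy max_value)

-- ===== LEMMAS AND PROOFS =====

-- B's while-loop returns true iff no m ≥ j with m*m ≤ i divides i (for 1 ≤ j).
theorem pvTrialLoop_iff (i : Int) : ∀ (j : Int), 1 ≤ j →
    (pvTrialLoop i j = true ↔ ∀ m, j ≤ m → m * m ≤ i → PySem.Int.mod i m ≠ 0) := by
  intro j
  generalize hn : (i + 2 - j).toNat = n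
  induction n using Nat.strong_induction_on generalizing j with
  | _ n ih =>
    intro hj
    rw [pvTrialLoop]
    by_cases h : j * j ≤ i
    · rw [dif_pos h]
      have hji : j ≤ i := le_trans (le_mul_of_one_le_left (by omega) hj) h
      by_cases hm : PySem.Int.mod i j == 0
      · simp only [hm, if_pos]
        exact iff_of_false (by simp) fun hall =>
          hall j le_rfl h (by simpa using hm)
      · rw [if_neg (by simpa using hm)]
        rw [ih (i + 2 - (j + 1)).toNat (by omega) (j + 1) rfl (by omega)]
        constructor
        · intro H m hjm hsq
          by_cases hmj : m = j
          · subst hmj; simpa using hm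
          · exact H m (by omega) hsq
        · intro H m hjm hsq
          exact H m (by omega) hsq
    · rw [dif_neg h]
      refine iff_of_true rfl fun m hjm hsq => absurd hsq ?_
      have : j * j ≤ m * m := mul_le_mul hjm hjm (by omega) (by omega)
      omega

-- A's inner loop (written as !any over range(1, i)) characterised by divisors 2 ≤ j < i.
theorem predA_iff (i : Int) :
    (!((PySem.List.pyRange 1 i).any (fun j => PySem.Int.mod i j == 0 && j != 1))) = true ↔
      ∀ j, 2 ≤ j → j < i → ¬ j ∣ i := by
  rw [Bool.not_eq_eq_eq_not, Bool.not_true, List.any_eq_false]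
  constructor
  · intro h j h2 hji hdvd
    have := h j (PySem.List.mem_pyRange_one.mpr ⟨by omega, hji⟩)
    simp only [Bool.and_eq_true, beq_iff_eq, bne_iff_ne] at this
    exact this ⟨PySem.Int.mod_eq_zero_iff_dvd i j |>.mpr hdvd, by omega⟩
  · intro h j hj
    have hj' := PySem.List.mem_pyRange_one.mp hj
    simp only [Bool.and_eq_true, beq_iff_eq, bne_iff_ne, not_and]
    intro hmod h1
    have hdvd : j ∣ i := (PySem.Int.mod_eq_zero_iff_dvd i j).mp hmod
    exact h j (by omega) (by omega) hdvd

-- Elementary: a proper divisor exists iff one exists below the square root.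
theorem divisor_sqrt (i : Int) (hi : 1 ≤ i) :
    (∀ j, 2 ≤ j → j < i → ¬ j ∣ i) ↔ (∀ j, 2 ≤ j → j * j ≤ i → ¬ j ∣ i) := by
  constructor
  · intro H j h2 hsq hdvd
    exact H j h2 (by nlinarith) hdvd
  · intro H j h2 hji hdvd
    rcases hdvd with ⟨k, hk⟩
    have hk1 : 1 ≤ k := by nlinarith
    have hk2 : 2 ≤ k := by
      rcases (by omega : k = 1 ∨ 2 ≤ k) with h' | h'
      · subst h'; omega
      · exact h'
    by_cases hsq : j * j ≤ i
    · exact H j h2 hsq ⟨k, hk⟩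
    · have hkj : k < j := by nlinarith
      have hkk : k * k ≤ i := by nlinarith
      exact H k hk2 hkk ⟨j, by rw [hk]; ring⟩

-- A's primality test agrees with B's square-root trial division (for i ≥ 1).
theorem pred_eq (i : Int) (hi : 1 ≤ i) :
    (!((PySem.List.pyRange 1 i).any (fun j => PySem.Int.mod i j == 0 && j != 1))) =
      pvTrialLoop i 2 := by
  apply Bool.coe_iff_coe.mp
  rw [predA_iff i, pvTrialLoop_iff i 2 (by omega), divisor_sqrt i hi]
  simp only [ne_eq, PySem.Int.mod_eq_zero_iff_dvd]

-- folding Set.add over strictly increasing fresh elements = appending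
theorem foldl_setadd_eq_append (p q : Int → Bool) :
    ∀ (l : List Int) (s : List Int), (∀ x ∈ l, p x = q x) → l.Pairwise (· < ·) →
      (∀ x ∈ s, ∀ y ∈ l, x < y) →
      l.foldl (fun s i => if p i = false then s else PySem.Set.add s i) s =
        l.foldl (fun acc i => if q i then acc ++ [i] else acc) s := by
  intro l
  induction l with
  | nil => intro s _ _ _; rfl
  | cons a l ih =>
    intro s hpq hl hs
    have ha : p a = q a := hpq a (by simp)
    have hl' := List.pairwise_cons.mp hl
    simp only [List.foldl_cons]
    by_cases hq : q a
    · rw [if_neg (by simp [ha, hq]), if_pos hq]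
      have hnotmem : a ∉ s := fun hmem => lt_irrefl a (hs a hmem a (by simp))
      have hadd : PySem.Set.add s a = s ++ [a] := by
        simp [PySem.Set.add, PySem.Set.contains, hnotmem]
      rw [hadd]
      refine ih (s ++ [a]) (fun x hx => hpq x (by simp [hx])) hl'.2 ?_
      intro x hx y hy
      rcases List.mem_append.mp hx with hx' | hx'
      · exact hs x hx' y (by simp [hy])
      · simp only [List.mem_singleton] at hx'
        subst hx'
        exact hl'.1 y hy
    · rw [if_pos (by simp [ha, hq]), if_neg hq]
      exact ih s (fun x hx => hpq x (by simp [hx])) hl'.2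
        (fun x hx y hy => hs x hx y (by simp [hy]))

theorem foldl_setadd_fresh :
    ∀ (l : List Int) (s : List Int), (∀ x ∈ l, x ∉ s) → l.Nodup →
      l.foldl PySem.Set.add s = s ++ l := by
  intro l
  induction l with
  | nil => intro s _ _; simp
  | cons a l ih =>
    intro s hfresh hl
    have hnd := List.nodup_cons.mp hl
    have hadd : PySem.Set.add s a = s ++ [a] := by
      simp [PySem.Set.add, PySem.Set.contains, hfresh a (by simp)]
    simp only [List.foldl_cons, hadd]
    rw [ih (s ++ [a]) ?_ hnd.2]
    · simp
    · intro x hx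
      simp only [List.mem_append, List.mem_singleton, not_or]
      exact ⟨fun h => hfresh x (by simp [hx]) h, fun h => hnd.1 (h ▸ hx)⟩

theorem ofList_nodup (l : List Int) (hl : l.Nodup) : PySem.Set.ofList l = l := by
  rw [PySem.Set.ofList_eq_foldl]
  simpa using foldl_setadd_fresh l [] (by simp) hl

-- both prime lists are the same fold over range(1, max_value)
theorem primes_eq (max_value : Int) :
    (calc_primes_up_to max_value : List Int) =
      (PySem.List.pyRange 1 max_value).foldl
        (fun acc i => if pvTrialLoop i 2 then acc ++ [i] else acc) [] := by
  unfold calc_primes_up_to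
  refine foldl_setadd_eq_append _ _ (PySem.List.pyRange 1 max_value) [] ?_ ?_ (by simp)
  · intro x hx
    exact pred_eq x (by have := PySem.List.mem_pyRange_one.mp hx; omega)
  · exact PySem.List.pairwise_lt_pyRange_one 1 max_value

-- one pass of A's pair loop, characterised on getD
theorem pass_getD (c : Int → Bool) (k : String) (v : Int) :
    ∀ (P : List Int) (res : PySem.Dict String (PySem.Set (Int × Int))) (k' : String),
    (P.foldl
        (fun res i =>
          if c i then res.modify k PySem.Set.empty (fun s => PySem.Set.add s (i, i + v))
          else res) res).getD k' PySem.Set.empty =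
      if k' = k then
        (P.filter c).foldl (fun s i => PySem.Set.add s (i, i + v)) (res.getD k PySem.Set.empty)
      else res.getD k' PySem.Set.empty := by
  intro P
  induction P with
  | nil =>
    intro res k'
    simp only [List.foldl_nil, List.filter_nil]
    split_ifs with h
    · subst h; rfl
    · rfl
  | cons a P ih =>
    intro res k'
    simp only [List.foldl_cons, List.filter_cons]
    by_cases hc : c a
    · simp only [hc, if_true]
      rw [ih]
      split_ifs with h
      · subst h
        rw [PySem.Dict.getD_modify]
        simp
      · rw [PySem.Dict.getD_modify]
        simp [h]
    · simp only [hc]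
      exact ih res k'

theorem keys_insert_of_contains {ν : Type} (d : PySem.Dict String ν) (k : String) (w : ν)
    (h : d.contains k = true) : (d.insert k w).keys = d.keys := by
  have hit := PySem.Dict.items_insert_of_contains d w h
  simp only [PySem.Dict.keys, hit, List.map_map]
  apply List.map_congr_left
  intro p _
  by_cases hpk : p.1 = k <;> simp [hpk]

theorem pass_keys (c : Int → Bool) (k : String) (v : Int) :
    ∀ (P : List Int) (res : PySem.Dict String (PySem.Set (Int × Int))),
      res.contains k = true →
      (P.foldl
          (fun res i =>
            if c i then res.modify k PySem.Set.empty (fun s => PySem.Set.add s (i, i + v))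
            else res) res).keys = res.keys := by
  intro P
  induction P with
  | nil => intro res _; rfl
  | cons a P ih =>
    intro res hk
    simp only [List.foldl_cons]
    by_cases hc : c a
    · simp only [hc, if_true]
      have hmk : (res.modify k PySem.Set.empty
          (fun s => PySem.Set.add s (a, a + v))).keys = res.keys := by
        rw [PySem.Dict.keys_modify]
        exact keys_insert_of_contains res k _ hk
      rw [ih _ (by rw [PySem.Dict.contains_modify]; simp)]
      exact hmk
    · simp only [hc]
      exact ih res hk

-- proof-side abbreviations for A's pair loop and initial dict
def pvPass (P : List Int) (k : String) (v : Int)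
    (res : PySem.Dict String (PySem.Set (Int × Int))) :
    PySem.Dict String (PySem.Set (Int × Int)) :=
  P.foldl
    (fun res i =>
      if P.contains (i + v) then
        res.modify k PySem.Set.empty (fun s => PySem.Set.add s (i, i + v))
      else res) res

def pvRes0 : PySem.Dict String (PySem.Set (Int × Int)) :=
  (((PySem.Dict.empty).insert "gemelos" PySem.Set.empty).insert "primos"
      PySem.Set.empty).insert "sexy" PySem.Set.empty

theorem pvPass_keys (P : List Int) (k : String) (v : Int)
    (res : PySem.Dict String (PySem.Set (Int × Int))) (hk : res.contains k = true) :
    (pvPass P k v res).keys = res.keys :=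
  pass_keys (fun i => P.contains (i + v)) k v P res hk

theorem pvPass_getD (P : List Int) (k k' : String) (v : Int)
    (res : PySem.Dict String (PySem.Set (Int × Int))) :
    (pvPass P k v res).getD k' PySem.Set.empty =
      if k' = k then
        (P.filter (fun i => P.contains (i + v))).foldl
          (fun s i => PySem.Set.add s (i, i + v)) (res.getD k PySem.Set.empty)
      else res.getD k' PySem.Set.empty :=
  pass_getD (fun i => P.contains (i + v)) k v P res k'

-- ===== VERDICT (by name: the statement is the Claim_ definition above) =====
theorem gemelo_primo_sexy_spec : Claim_equal_gemelo_primo_sexy := by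
  intro mv _
  unfold Spec_gemelo_primo_sexy
  have hA : gemelo_primo_sexy mv =
      (pvPass (calc_primes_up_to mv) "sexy" 6
        (pvPass (calc_primes_up_to mv) "primos" 4
          (pvPass (calc_primes_up_to mv) "gemelos" 2 pvRes0))).items := rfl
  rw [hA]
  rw [primes_eq mv]
  set P : List Int :=
    (PySem.List.pyRange 1 mv).foldl
      (fun acc i => if pvTrialLoop i 2 then acc ++ [i] else acc) [] with hPdef
  -- P is a Nodup list
  have hPfilter : P = ((PySem.List.pyRange 1 mv).filter (fun i => pvTrialLoop i 2)).map
      (fun i => i) := by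
    rw [hPdef, PySem.List.foldl_append_if (fun i => pvTrialLoop i 2) (fun i => i)
      (PySem.List.pyRange 1 mv) []]
    simp
  have hPnodup : P.Nodup := by
    rw [hPfilter]
    simp only [List.map_id']
    exact (PySem.List.nodup_pyRange_one 1 mv).filter _
  have hofList : PySem.Set.ofList P = P := ofList_nodup P hPnodup
  -- keys through the passes
  have hk0 : pvRes0.keys = ["gemelos", "primos", "sexy"] := rfl
  have hc1 : pvRes0.contains "gemelos" = true := rfl
  have hk1 := pvPass_keys P "gemelos" 2 pvRes0 hc1
  have hcont : ∀ (d : PySem.Dict String (PySem.Set (Int × Int))) (k : String),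
      d.keys = ["gemelos", "primos", "sexy"] → k ∈ (["gemelos", "primos", "sexy"] : List String) →
      d.contains k = true := by
    intro d k hd hk
    rw [PySem.Dict.contains_eq_decide_mem_keys, hd]
    simpa using hk
  have hk2 := pvPass_keys P "primos" 4 _ (hcont _ "primos" (hk1.trans hk0) (by simp))
  have hk3 := pvPass_keys P "sexy" 6 _
    (hcont _ "sexy" ((hk2.trans hk1).trans hk0) (by simp))
  have hkeys : (pvPass P "sexy" 6 (pvPass P "primos" 4 (pvPass P "gemelos" 2 pvRes0))).keys =
      ["gemelos", "primos", "sexy"] := ((hk3.trans hk2).trans hk1).trans hk0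
  -- items via keys + getD
  have hnd : (pvPass P "sexy" 6 (pvPass P "primos" 4 (pvPass P "gemelos" 2 pvRes0))).keys.Nodup := by
    rw [hkeys]; decide
  rw [PySem.Dict.items_eq_map_keys _ hnd PySem.Set.empty, hkeys]
  -- compute the three values
  have hg : (pvPass P "sexy" 6 (pvPass P "primos" 4 (pvPass P "gemelos" 2 pvRes0))).getD
      "gemelos" PySem.Set.empty =
      (P.filter (fun i => P.contains (i + 2))).foldl
        (fun s i => PySem.Set.add s (i, i + 2)) PySem.Set.empty := by
    rw [pvPass_getD, if_neg (by decide), pvPass_getD, if_neg (by decide),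
      pvPass_getD, if_pos rfl]
    rfl
  have hp : (pvPass P "sexy" 6 (pvPass P "primos" 4 (pvPass P "gemelos" 2 pvRes0))).getD
      "primos" PySem.Set.empty =
      (P.filter (fun i => P.contains (i + 4))).foldl
        (fun s i => PySem.Set.add s (i, i + 4)) PySem.Set.empty := by
    rw [pvPass_getD, if_neg (by decide), pvPass_getD, if_pos rfl, pvPass_getD,
      if_neg (by decide)]
    rfl
  have hs : (pvPass P "sexy" 6 (pvPass P "primos" 4 (pvPass P "gemelos" 2 pvRes0))).getD
      "sexy" PySem.Set.empty =
      (P.filter (fun i => P.contains (i + 6))).foldl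
        (fun s i => PySem.Set.add s (i, i + 6)) PySem.Set.empty := by
    rw [pvPass_getD, if_pos rfl, pvPass_getD, if_neg (by decide), pvPass_getD,
      if_neg (by decide)]
    rfl
  -- B's side
  have hB : gemelo_primo_sexy_alt mv =
      [("gemelos", PySem.Set.ofList ((P.filter
          (fun p => (PySem.Set.ofList P).contains (p + 2))).map (fun p => (p, p + 2)))),
       ("primos", PySem.Set.ofList ((P.filter
          (fun p => (PySem.Set.ofList P).contains (p + 4))).map (fun p => (p, p + 4)))),
       ("sexy", PySem.Set.ofList ((P.filter
          (fun p => (PySem.Set.ofList P).contains (p + 6))).map (fun p => (p, p + 6))))] := rfl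
  rw [hB]
  simp only [hofList, PySem.Set.ofList_eq_foldl, List.foldl_map]
  simp only [List.map_cons, List.map_nil]
  rw [hg, hp, hs]
  rfl
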